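-- pv_equiv track=rewrite | github.com/pppmouren/CollegeProject_PSU | CMPSC442/HW/CMPSC442_HW1/homework1_xql5448.py | solve_disk
-- ===== SOURCE A (Python) =====
-- import copy
-- from collections import deque
--
-- def move_func(index, step, maxLength, board):
--     board[index + step] = board[index]
--     board[index] = 0
--
-- def successor(board):
--     length = len(board)
--     # four possiable moves
--     for i in range(length):
--         if board[i] !=0:
--             if i + 1 < length and board[i + 1] == 0:
--                 tempBoard = copy.deepcopy(board)
--                 move_func(i, 1, length, tempBoard)
--                 yield((i,i+1), tempBoard)
--
--             if i - 1 >= 0 and board[i - 1] == 0: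
--                 tempBoard = copy.deepcopy(board)
--                 move_func(i, -1, length, tempBoard)
--                 yield((i,i-1), tempBoard)
--
--             if i + 2 < length and board[i + 2] == 0 and board[i + 1] != 0:
--                 tempBoard = copy.deepcopy(board)
--                 move_func(i, 2, length, tempBoard)
--                 yield((i,i+2), tempBoard)
--
--             if i - 2 >= 0 and board[i - 2] == 0 and board[i - 1] != 0:
--                 tempBoard = copy.deepcopy(board)
--                 move_func(i, -2, length, tempBoard)
--                 yield((i,i-2), tempBoard)
--
-- def LD_is_solved(testBoard, targetBoard):
--     if testBoard == targetBoard: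
--         return True
--     return False
--
-- def solve_disk(length, n, board):
--     targetBoard = board[::-1]
--     boardTuple = tuple(board) # list is mutable, cannnot be used as a key
--
--     dict = {} # key = tuple of current node or board, value = [move, parent board]
--     result = []
--
--     # define queue
--     visited_set = set()
--     queue = deque([board])
--
--     # set root node as visited
--     visited_set.add(boardTuple)
--
--     #init dictionary
--     dict[boardTuple] = [(0,0), None]
--
--     while queue:
--         visitedBoard = queue.popleft()
--
--         for move, nextBoard in successor(visitedBoard):
--             nextBoardTuple = tuple(nextBoard)
--
--             # if visited then ignore
--             if nextBoardTuple in visited_set: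
--                 continue
--             # mark neighbors as visited and store move and parent node to dict
--             visited_set.add(nextBoardTuple)
--             dict[nextBoardTuple] = [move, visitedBoard]
--
--             # check if solved, if solved, return the moves, if not, append this one to queue
--             if LD_is_solved(nextBoard, targetBoard):
--                 # get all the moves from dictionary
--                 currentBoard = nextBoard
--                 while (currentBoard != board):
--                     result = [dict[tuple(currentBoard)][0]] + result
--                     currentBoard = dict[tuple(currentBoard)][1]
--                 return result
--
--             queue.append(nextBoard)
--     return None
-- ===== SOURCE B (Python) =====
-- from collections import deque
--
-- def solve_disk(length, n, board):
--     # BFS carrying (board, path) pairs in the queue; no parent dict, no back-reconstruction.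
--     targetBoard = board[::-1]
--     visited = {tuple(board)}
--     queue = deque([(board, [])])
--     while queue:
--         cur, path = queue.popleft()
--         clen = len(cur)
--         for i in range(clen):
--             if cur[i] == 0:
--                 continue
--             for step in (1, -1, 2, -2):
--                 j = i + step
--                 if j < 0 or j >= clen:
--                     continue
--                 if cur[j] != 0:
--                     continue
--                 if abs(step) == 2 and cur[i + (step // 2)] == 0:
--                     continue
--                 nb = list(cur)
--                 nb[j] = nb[i]
--                 nb[i] = 0
--                 key = tuple(nb)
--                 if key in visited:
--                     continue
--                 if nb == targetBoard:
--                     return path + [(i, j)]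
--                 visited.add(key)
--                 queue.append((nb, path + [(i, j)]))
--     return None
-- ===== Notes on version B (the rewrite author's own statement) =====
-- stated objective: simpler
-- what changed: B's BFS carries the forward move path with each queued board, eliminating A's parent-pointer dictionary and the backward while-loop that reconstructs the path from it; the per-cell four-branch successor generator is folded into one loop over the step offsets (1, -1, 2, -2).
import Mathlib
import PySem

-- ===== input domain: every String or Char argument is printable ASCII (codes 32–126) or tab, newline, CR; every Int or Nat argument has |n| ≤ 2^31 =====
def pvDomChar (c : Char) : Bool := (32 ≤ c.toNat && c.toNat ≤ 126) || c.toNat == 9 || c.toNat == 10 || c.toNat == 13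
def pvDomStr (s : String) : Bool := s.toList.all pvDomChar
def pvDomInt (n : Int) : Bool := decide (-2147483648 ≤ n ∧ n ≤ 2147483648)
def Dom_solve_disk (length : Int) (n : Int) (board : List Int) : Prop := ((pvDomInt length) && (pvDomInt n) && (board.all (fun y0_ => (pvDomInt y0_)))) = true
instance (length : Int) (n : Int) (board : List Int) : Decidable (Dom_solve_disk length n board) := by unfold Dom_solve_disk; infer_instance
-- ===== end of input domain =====

-- B replaces A's parent-pointer dictionary and backward path reconstruction by carrying the
-- forward move path with each queued board (objective: simpler — no dict, no rebuild loop).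

-- move_func: board[index+step] = board[index]; board[index] = 0  (shared by both Pythons verbatim)
def pvMove (board : List Int) (i j : Int) : List Int :=
  PySem.List.pySetD (PySem.List.pySetD board j (PySem.List.pyGetD board i 0)) i 0

-- ===== PORT A =====
-- successor(board): the four candidate moves per cell, in A's yield order
def succCellA (board : List Int) (i : Nat) : List ((Int × Int) × List Int) :=
  let len : Int := (board.length : Int)
  let ii : Int := (i : Int)
  if PySem.List.pyGetD board ii 0 ≠ 0 then
    (if ii + 1 < len ∧ PySem.List.pyGetD board (ii + 1) 0 = 0 then
        [((ii, ii + 1), pvMove board ii (ii + 1))] else [])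
    ++ (if 0 ≤ ii - 1 ∧ PySem.List.pyGetD board (ii - 1) 0 = 0 then
        [((ii, ii - 1), pvMove board ii (ii - 1))] else [])
    ++ (if ii + 2 < len ∧ PySem.List.pyGetD board (ii + 2) 0 = 0 ∧ PySem.List.pyGetD board (ii + 1) 0 ≠ 0 then
        [((ii, ii + 2), pvMove board ii (ii + 2))] else [])
    ++ (if 0 ≤ ii - 2 ∧ PySem.List.pyGetD board (ii - 2) 0 = 0 ∧ PySem.List.pyGetD board (ii - 1) 0 ≠ 0 then
        [((ii, ii - 2), pvMove board ii (ii - 2))] else [])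
  else []

def successorA (board : List Int) : List ((Int × Int) × List Int) :=
  (List.range board.length).flatMap (succCellA board)

-- the reconstruction while-loop: `while currentBoard != board: result = [dict[cur][0]] + result; cur = dict[cur][1]`
-- fuel = dict size bounds the parent chain (every step follows an entry inserted earlier); the
-- `none` fallbacks are unreachable on faithful runs.
def reconA (d : PySem.Dict (List Int) ((Int × Int) × Option (List Int))) (root : List Int) :
    Nat → List Int → List (Int × Int) → List (Int × Int)
  | 0, _, res => res
  | g + 1, cur, res =>
    if cur = root then res
    else
      match d.get? cur with
      | some (m, some p) => reconA d root g p (m :: res)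
      | _ => res

-- the body of `for move, nextBoard in successor(visitedBoard)`
def innerA (target root : List Int) :
    List ((Int × Int) × List Int) →
    PySem.Dict (List Int) ((Int × Int) × Option (List Int)) → PySem.Set (List Int) →
    List (List Int) → List Int →
    Sum (List (Int × Int))
        (PySem.Dict (List Int) ((Int × Int) × Option (List Int)) × PySem.Set (List Int) × List (List Int))
  | [], d, v, q, _ => .inr (d, v, q)
  | (m, nb) :: rest, d, v, q, cur =>
    if PySem.Set.contains v nb then innerA target root rest d v q cur
    else
      let v' := PySem.Set.add v nb
      let d' := d.insert nb (m, some cur)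
      if nb = target then .inl (reconA d' root d'.size nb [])
      else innerA target root rest d' v' (q ++ [nb]) cur

-- `while queue:`; fuel ≥ number of pops (each popped board was enqueued exactly once, guarded by
-- visited, so pops ≤ (distinct boards) + 1 ≤ length! + 1 = pvFuel board)
def loopA (target root : List Int) :
    Nat → PySem.Dict (List Int) ((Int × Int) × Option (List Int)) → PySem.Set (List Int) →
    List (List Int) → Option (List (Int × Int))
  | 0, _, _, _ => none
  | _ + 1, _, _, [] => none
  | g + 1, d, v, cur :: rest =>
    match innerA target root (successorA cur) d v rest cur with
    | .inl r => some r
    | .inr (d', v', q') => loopA target root g d' v' q'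

def pvFuel (board : List Int) : Nat := Nat.factorial board.length + 1

def solve_disk (length : Int) (n : Int) (board : List Int) : Option (List (Int × Int)) :=
  let target := board.reverse  -- board[::-1]  (PySem.List.slice?_none_none_neg_one)
  loopA target board (pvFuel board)
    (PySem.Dict.empty.insert board ((0, 0), none))
    (PySem.Set.add PySem.Set.empty board) [board]

-- ===== PORT B =====
-- Source B's inner `for step in (1, -1, 2, -2)` body
def succStepB (cur : List Int) (i : Nat) (step : Int) : List ((Int × Int) × List Int) :=
  let clen : Int := (cur.length : Int)
  let j : Int := (i : Int) + step
  if j < 0 ∨ clen ≤ j then []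
  else if PySem.List.pyGetD cur j 0 ≠ 0 then []
  else if step.natAbs = 2 ∧ PySem.List.pyGetD cur ((i : Int) + PySem.Int.floordiv step 2) 0 = 0 then []
  else [(((i : Int), j), pvMove cur (i : Int) j)]

def succCellB (cur : List Int) (i : Nat) : List ((Int × Int) × List Int) :=
  if PySem.List.pyGetD cur (i : Int) 0 = 0 then []
  else ([1, -1, 2, -2] : List Int).flatMap (succStepB cur i)

def successorB (cur : List Int) : List ((Int × Int) × List Int) :=
  (List.range cur.length).flatMap (succCellB cur)

-- Source B's candidate handling: skip visited, return path+[(i,j)] on target, else mark and enqueue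
def innerB (target : List Int) :
    List ((Int × Int) × List Int) → PySem.Set (List Int) →
    List (List Int × List (Int × Int)) → List (Int × Int) →
    Sum (List (Int × Int)) (PySem.Set (List Int) × List (List Int × List (Int × Int)))
  | [], v, q, _ => .inr (v, q)
  | (m, nb) :: rest, v, q, path =>
    if PySem.Set.contains v nb then innerB target rest v q path
    else if nb = target then .inl (path ++ [m])
    else innerB target rest (PySem.Set.add v nb) (q ++ [(nb, path ++ [m])]) path

def loopB (target : List Int) :
    Nat → PySem.Set (List Int) → List (List Int × List (Int × Int)) → Option (List (Int × Int))
  | 0, _, _ => none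
  | _ + 1, _, [] => none
  | g + 1, v, (cur, path) :: rest =>
    match innerB target (successorB cur) v rest path with
    | .inl r => some r
    | .inr (v', q') => loopB target g v' q'

def solve_disk_alt (length : Int) (n : Int) (board : List Int) : Option (List (Int × Int)) :=
  let target := board.reverse  -- board[::-1]
  loopB target (pvFuel board) (PySem.Set.add PySem.Set.empty board) [(board, [])]

-- ===== PRECONDITION & SPEC =====
def Spec_solve_disk (length : Int) (n : Int) (board : List Int) (out : Option (List (Int × Int))) : Prop := out = solve_disk_alt length n board
instance (length : Int) (n : Int) (board : List Int) (out : Option (List (Int × Int))) : Decidable (Spec_solve_disk length n board out) := by unfold Spec_solve_disk; infer_instance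

-- ===== CLAIM (what is proved, stated in full; the proofs are below) =====
def Claim_equal_solve_disk : Prop := ∀ (length : Int) (n : Int) (board : List Int), Dom_solve_disk length n board → Spec_solve_disk length n board (solve_disk length n board)

-- ===== LEMMAS AND PROOFS =====

-- B's step-loop body produces exactly A's corresponding if-block, for each of the four steps
theorem succStep_one (board : List Int) (i : Nat) (hi : i < board.length) :
    succStepB board i 1 =
      (if (i : Int) + 1 < (board.length : Int) ∧ PySem.List.pyGetD board ((i : Int) + 1) 0 = 0 then
        [(((i : Int), (i : Int) + 1), pvMove board (i : Int) ((i : Int) + 1))] else []) := by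
  simp only [succStepB]
  split_ifs with h1 h2 h3 h4 h4 <;> first
    | rfl
    | (exfalso; omega)

theorem succStep_neg_one (board : List Int) (i : Nat) (hi : i < board.length) :
    succStepB board i (-1) =
      (if 0 ≤ (i : Int) - 1 ∧ PySem.List.pyGetD board ((i : Int) - 1) 0 = 0 then
        [(((i : Int), (i : Int) - 1), pvMove board (i : Int) ((i : Int) - 1))] else []) := by
  have e : (i : Int) + (-1) = (i : Int) - 1 := by ring
  simp only [succStepB, e]
  split_ifs with h1 h2 h3 h4 h4 <;> first
    | rfl
    | (exfalso; omega)

theorem succStep_two (board : List Int) (i : Nat) (hi : i < board.length) :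
    succStepB board i 2 =
      (if (i : Int) + 2 < (board.length : Int) ∧ PySem.List.pyGetD board ((i : Int) + 2) 0 = 0 ∧
            PySem.List.pyGetD board ((i : Int) + 1) 0 ≠ 0 then
        [(((i : Int), (i : Int) + 2), pvMove board (i : Int) ((i : Int) + 2))] else []) := by
  have hf : PySem.Int.floordiv 2 2 = 1 := by decide
  simp only [succStepB, hf]
  split_ifs with h1 h2 h3 h4 h4 <;> first
    | rfl
    | (exfalso; omega)

theorem succStep_neg_two (board : List Int) (i : Nat) (hi : i < board.length) :
    succStepB board i (-2) =
      (if 0 ≤ (i : Int) - 2 ∧ PySem.List.pyGetD board ((i : Int) - 2) 0 = 0 ∧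
            PySem.List.pyGetD board ((i : Int) - 1) 0 ≠ 0 then
        [(((i : Int), (i : Int) - 2), pvMove board (i : Int) ((i : Int) - 2))] else []) := by
  have hf : PySem.Int.floordiv (-2) 2 = -1 := by decide
  have e2 : (i : Int) + (-2) = (i : Int) - 2 := by ring
  have e1 : (i : Int) + (-1) = (i : Int) - 1 := by ring
  simp only [succStepB, hf, e1, e2]
  split_ifs with h1 h2 h3 h4 h4 <;> first
    | rfl
    | (exfalso; omega)

theorem succCell_eq (board : List Int) (i : Nat) (hi : i < board.length) :
    succCellB board i = succCellA board i := by
  simp only [succCellB, succCellA, List.flatMap_cons, List.flatMap_nil, List.append_nil,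
    succStep_one board i hi, succStep_neg_one board i hi, succStep_two board i hi,
    succStep_neg_two board i hi]
  by_cases h0 : PySem.List.pyGetD board (i : Int) 0 = 0
  · simp [h0]
  · simp only [if_neg h0]
    rw [if_pos h0, List.append_assoc, List.append_assoc]

theorem successor_eq (board : List Int) : successorB board = successorA board := by
  simp only [successorB, successorA]
  have : ∀ (l : List Nat), (∀ x ∈ l, x < board.length) →
      l.flatMap (succCellB board) = l.flatMap (succCellA board) := by
    intro l hl
    induction l with
    | nil => rfl
    | cons x xs ih =>
      simp only [List.flatMap_cons]
      rw [succCell_eq board x (hl x (List.mem_cons_self)), ih (fun y hy => hl y (List.mem_cons_of_mem _ hy))]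
  exact this _ (fun x hx => List.mem_range.mp hx)

-- the parent chain recorded in A's dict for a reached board, with its forward move path
inductive Chain (d : PySem.Dict (List Int) ((Int × Int) × Option (List Int))) (root : List Int) :
    List Int → List (Int × Int) → Prop
  | nil : Chain d root root []
  | cons {b c : List Int} {m : Int × Int} {p : List (Int × Int)} :
      b ≠ root → d.get? b = some (m, some c) → Chain d root c p → Chain d root b (p ++ [m])

theorem recon_of_chain {d : PySem.Dict (List Int) ((Int × Int) × Option (List Int))}
    {root : List Int} {b : List Int} {p : List (Int × Int)} (h : Chain d root b p) :
    ∀ (g : Nat) (res : List (Int × Int)), p.length ≤ g → reconA d root g b res = p ++ res := by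
  induction h with
  | nil => intro g res _; cases g <;> simp [reconA]
  | @cons b' c' m' p' hne hget hc ih =>
    intro g res hg
    cases g with
    | zero => simp at hg
    | succ g =>
      have hgl : p'.length ≤ g := by simp at hg; omega
      simp only [reconA, if_neg hne, hget]
      rw [ih g _ hgl]
      simp

theorem chain_insert {d : PySem.Dict (List Int) ((Int × Int) × Option (List Int))}
    {root nb : List Int} {v : (Int × Int) × Option (List Int)} (hf : d.get? nb = none)
    {b : List Int} {p : List (Int × Int)} (h : Chain d root b p) :
    Chain (d.insert nb v) root b p := by
  induction h with
  | nil => exact .nil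
  | @cons b' c' m' p' hne hget hc ih =>
    refine .cons hne ?_ ih
    have hbne : b' ≠ nb := by intro he; rw [he, hf] at hget; cases hget
    rw [PySem.Dict.get?_insert_of_ne _ _ hbne]
    exact hget

theorem inner_eq (target root cur : List Int) (path : List (Int × Int)) :
    ∀ (succs : List ((Int × Int) × List Int))
      (d : PySem.Dict (List Int) ((Int × Int) × Option (List Int))) (v : PySem.Set (List Int))
      (qB : List (List Int × List (Int × Int))),
      Chain d root cur path → path.length < d.size →
      (∀ k, (d.get? k).isSome = true → PySem.Set.contains v k = true) →
      PySem.Set.contains v root = true →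
      (∀ x ∈ qB, Chain d root x.1 x.2 ∧ x.2.length < d.size) →
      (∃ r, innerA target root succs d v (qB.map Prod.fst) cur = .inl r ∧
            innerB target succs v qB path = .inl r)
      ∨ (∃ d' v' qB', innerA target root succs d v (qB.map Prod.fst) cur = .inr (d', v', qB'.map Prod.fst) ∧
            innerB target succs v qB path = .inr (v', qB') ∧
            (∀ x ∈ qB', Chain d' root x.1 x.2 ∧ x.2.length < d'.size) ∧
            (∀ k, (d'.get? k).isSome = true → PySem.Set.contains v' k = true) ∧
            PySem.Set.contains v' root = true) := by
  intro succs
  induction succs with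
  | nil =>
    intro d v qB hcur hlen hkeys hroot hq
    exact Or.inr ⟨d, v, qB, rfl, rfl, hq, hkeys, hroot⟩
  | cons hd rest ih =>
    obtain ⟨m, nb⟩ := hd
    intro d v qB hcur hlen hkeys hroot hq
    by_cases hvis : PySem.Set.contains v nb = true
    · simp only [innerA, innerB, hvis, if_pos]
      exact ih d v qB hcur hlen hkeys hroot hq
    · have hfresh : d.get? nb = none := by
        cases hg : d.get? nb with
        | none => rfl
        | some w => exact absurd (hkeys nb (by simp [hg])) hvis
      have hnbroot : nb ≠ root := by intro he; rw [he] at hvis; exact hvis hroot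
      have hcont : d.contains nb = false := by
        rw [PySem.Dict.contains_eq_isSome_get?, hfresh]; rfl
      have hsize : (d.insert nb (m, some cur)).size = d.size + 1 := by
        rw [PySem.Dict.size_insert, hcont]; simp
      have hchain' : Chain (d.insert nb (m, some cur)) root nb (path ++ [m]) :=
        .cons hnbroot (PySem.Dict.get?_insert_self d nb _) (chain_insert hfresh hcur)
      by_cases htgt : nb = target
      · refine Or.inl ⟨path ++ [m], ?_, ?_⟩
        · simp only [innerA]
          rw [if_neg hvis, if_pos htgt]
          have hlen2 : (path ++ [m]).length ≤ (d.insert nb (m, some cur)).size := by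
            simp only [List.length_append, List.length_cons, List.length_nil, hsize]
            omega
          rw [recon_of_chain hchain' _ [] hlen2]
          simp
        · simp only [innerB]
          rw [if_neg hvis, if_pos htgt]
      · simp only [innerA, innerB]
        rw [if_neg hvis, if_neg htgt, if_neg hvis, if_neg htgt]
        have hmap : (qB.map Prod.fst) ++ [nb] = (qB ++ [(nb, path ++ [m])]).map Prod.fst := by simp
        rw [hmap]
        refine ih (d.insert nb (m, some cur)) (PySem.Set.add v nb) (qB ++ [(nb, path ++ [m])])
          (chain_insert hfresh hcur) (by omega) ?_ ?_ ?_
        · intro k hk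
          by_cases hkb : k = nb
          · subst hkb
            rw [PySem.Set.contains_iff]
            exact (PySem.Set.mem_add _ _ _).mpr (Or.inr rfl)
          · rw [PySem.Dict.get?_insert_of_ne _ _ hkb] at hk
            rw [PySem.Set.contains_iff]
            exact (PySem.Set.mem_add _ _ _).mpr (Or.inl ((PySem.Set.contains_iff _ _).mp (hkeys k hk)))
        · rw [PySem.Set.contains_iff]
          exact (PySem.Set.mem_add _ _ _).mpr (Or.inl ((PySem.Set.contains_iff _ _).mp hroot))
        · intro x hx
          rcases List.mem_append.mp hx with hx | hx
          · exact ⟨chain_insert hfresh (hq x hx).1, by have := (hq x hx).2; omega⟩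
          · simp at hx
            subst hx
            refine ⟨hchain', ?_⟩
            simp only [List.length_append, List.length_cons, List.length_nil, hsize]
            omega

theorem loop_eq (target root : List Int) :
    ∀ (g : Nat) (d : PySem.Dict (List Int) ((Int × Int) × Option (List Int)))
      (v : PySem.Set (List Int)) (qB : List (List Int × List (Int × Int))),
      (∀ k, (d.get? k).isSome = true → PySem.Set.contains v k = true) →
      PySem.Set.contains v root = true →
      (∀ x ∈ qB, Chain d root x.1 x.2 ∧ x.2.length < d.size) →
      loopA target root g d v (qB.map Prod.fst) = loopB target g v qB := by
  intro g
  induction g with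
  | zero => intro d v qB _ _ _; rfl
  | succ g ih =>
    intro d v qB hkeys hroot hq
    cases qB with
    | nil => rfl
    | cons hd tl =>
      obtain ⟨cur, path⟩ := hd
      have hhd := hq (cur, path) List.mem_cons_self
      simp only [List.map_cons, loopA, loopB, successor_eq cur]
      rcases inner_eq target root cur path (successorA cur) d v tl hhd.1 hhd.2 hkeys hroot
          (fun x hx => hq x (List.mem_cons_of_mem _ hx)) with
        ⟨r, hA, hB⟩ | ⟨d', v', qB', hA, hB, h1, h2, h3⟩
      · rw [hA, hB]
      · rw [hA, hB]
        exact ih d' v' qB' h2 h3 h1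

-- ===== VERDICT (by name: the statement is the Claim_ definition above) =====
theorem solve_disk_spec : Claim_equal_solve_disk := by
  intro length n board _
  unfold Spec_solve_disk solve_disk solve_disk_alt
  have hq0 : [board] = ([(board, ([] : List (Int × Int)))].map Prod.fst) := by simp
  rw [hq0]
  refine loop_eq board.reverse board (pvFuel board) _ _ _ ?_ ?_ ?_
  · intro k hk
    by_cases hkb : k = board
    · subst hkb
      rw [PySem.Set.contains_iff]
      exact (PySem.Set.mem_add _ _ _).mpr (Or.inr rfl)
    · rw [PySem.Dict.get?_insert_of_ne _ _ hkb, PySem.Dict.get?_empty] at hk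
      cases hk
  · rw [PySem.Set.contains_iff]
    exact (PySem.Set.mem_add _ _ _).mpr (Or.inr rfl)
  · intro x hx
    simp at hx
    subst hx
    refine ⟨Chain.nil, ?_⟩
    rw [PySem.Dict.size_insert]
    simp [PySem.Dict.contains_empty, PySem.Dict.size_empty]
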